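-- pv_equiv track=rewrite | github.com/ganavee/Solutions-to-CLRS-Algorithms | Recursion/countSubSequenceWhoseSumIsK.py | subseq1
-- ===== SOURCE A (Python) =====
-- def subseq1(sumString, string, seq, arr, k):
--     if(seq == ""):
--         if(sumString == k):
--             arr.append(string)
--         return arr
--     popChar = seq[-1]
--     popNum = int(popChar)
--     seq = seq[:-1]
--     subseq1(sumString, string, seq, arr, k)
--     subseq1(popNum + sumString, popChar + string, seq, arr, k)
--     return arr
-- ===== SOURCE B (Python) =====
-- def subseq1(sumString, string, seq, arr, k):
--     nums = [int(c) for c in seq]  # ValueError on a non-digit char, before any append (as in A)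
--     n = len(seq)
--     for mask in range(1 << n):
--         total = 0
--         chosen = []
--         for i in range(n):
--             if (mask >> i) & 1:
--                 total += nums[i]
--                 chosen.append(seq[i])
--         if total + sumString == k:
--             arr.append(''.join(chosen) + string)
--     return arr
-- ===== Notes on version B (the rewrite author's own statement) =====
-- stated objective: alternative
-- what changed: Replaced A's branching recursion (pop last char, recurse twice) by a single iterative bitmask enumeration: precompute nums=[int(c) for c in seq], then for mask in range(2**n) collect the selected characters and their digit sum in one inner loop; increasing mask order reproduces A's DFS append order exactly.
import Mathlib
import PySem

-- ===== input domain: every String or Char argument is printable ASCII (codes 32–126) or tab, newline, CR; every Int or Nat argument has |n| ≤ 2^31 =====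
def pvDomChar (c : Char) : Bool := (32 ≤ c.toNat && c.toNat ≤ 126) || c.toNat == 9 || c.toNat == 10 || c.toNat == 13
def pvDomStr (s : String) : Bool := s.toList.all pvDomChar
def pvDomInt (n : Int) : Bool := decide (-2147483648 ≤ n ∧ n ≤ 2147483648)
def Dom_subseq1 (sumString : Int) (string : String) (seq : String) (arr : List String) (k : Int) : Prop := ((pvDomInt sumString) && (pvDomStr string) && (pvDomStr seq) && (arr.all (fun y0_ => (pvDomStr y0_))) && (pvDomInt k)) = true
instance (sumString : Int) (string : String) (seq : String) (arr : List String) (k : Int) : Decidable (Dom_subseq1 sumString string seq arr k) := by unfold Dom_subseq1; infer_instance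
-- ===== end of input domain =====

-- B replaces A's branching recursion by a single iterative bitmask enumeration of all
-- subsequences (increasing mask order = A's DFS append order); objective: alternative
-- (iterative, non-recursive) decomposition of the same exponential enumeration.
-- NOTE: Python A mutates `arr` in place (appends); Python B performs the same appends to
-- the same `arr` object. The equivalence proved here is about the return value.

-- ===== PORT A =====
-- A recurses on the string seq, popping its last character; ported over seq.toList,
-- with `string` carried as a List Char (characters are prepended one at a time, as in
-- `popChar + string`); int(popChar) is PySem.Int.ofStr? (none = ValueError, excluded by Pre_).
def subseq1Aux (sumString : Int) (string : List Char) (seq : List Char) (arr : List String) (k : Int) : List String :=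
  if h : seq = [] then
    if sumString = k then arr ++ [String.mk string] else arr
  else
    match PySem.List.pyGet? seq (-1) with
    | none => arr  -- unreachable: seq ≠ []
    | some popChar =>
      match PySem.Int.ofStr? (String.mk [popChar]) with
      | none => arr  -- int() raises ValueError; such inputs are outside Pre_subseq1
      | some popNum =>
        let seq' := PySem.List.slice seq none (some (-1))
        let arr1 := subseq1Aux sumString string seq' arr k
        subseq1Aux (popNum + sumString) (popChar :: string) seq' arr1 k
termination_by seq.length
decreasing_by
  all_goals
    simp only [PySem.List.slice_to_neg_one, List.length_dropLast]
    have := List.length_pos_of_ne_nil h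
    omega

def subseq1 (sumString : Int) (string : String) (seq : String) (arr : List String) (k : Int) : List String :=
  subseq1Aux sumString string.toList seq.toList arr k

-- ===== PORT B =====
-- nums = [int(c) for c in seq] : none if any int(c) raises
def numsOf : List Char → Option (List Int)
  | [] => some []
  | c :: rest =>
    match PySem.Int.ofStr? (String.mk [c]), numsOf rest with
    | some v, some vs => some (v :: vs)
    | _, _ => none

-- inner loop body: for i in range(n): if (mask >> i) & 1: total += nums[i]; chosen.append(seq[i])
def gB (cs : List Char) (nums : List Int) (mask : Nat) : Int × List Char → Nat → Int × List Char :=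
  fun p i => if mask.testBit i then (p.1 + nums.getD i 0, p.2 ++ [cs.getD i ' ']) else p

-- outer loop body: if total + sumString == k: arr.append(''.join(chosen) + string)
def fB (cs : List Char) (nums : List Int) (sumString : Int) (string : List Char) (k : Int) : List String → Nat → List String :=
  fun acc mask =>
    let p := (List.range cs.length).foldl (gB cs nums mask) (0, [])
    if p.1 + sumString = k then acc ++ [String.mk (p.2 ++ string)] else acc

def subseq1_alt (sumString : Int) (string : String) (seq : String) (arr : List String) (k : Int) : List String :=
  match numsOf seq.toList with
  | none => arr  -- int() raises ValueError; outside Pre_subseq1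
  | some nums =>
    (List.range (2 ^ seq.toList.length)).foldl (fB seq.toList nums sumString string.toList k) arr

-- ===== PRECONDITION & SPEC =====
-- Pre_ excludes inputs on which A (and B) raise ValueError: a seq character that int() rejects.
def Pre_subseq1 (sumString : Int) (string : String) (seq : String) (arr : List String) (k : Int) : Prop :=
  (seq.toList.all (fun c => (PySem.Int.ofStr? (String.mk [c])).isSome)) = true
instance (sumString : Int) (string : String) (seq : String) (arr : List String) (k : Int) : Decidable (Pre_subseq1 sumString string seq arr k) := by unfold Pre_subseq1; infer_instance

def pvWitness_subseq1 : Int × String × String × List String × Int := (0, "x", "12", ["y"], 3)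

def Spec_subseq1 (sumString : Int) (string : String) (seq : String) (arr : List String) (k : Int) (out : List String) : Prop := out = subseq1_alt sumString string seq arr k
instance (sumString : Int) (string : String) (seq : String) (arr : List String) (k : Int) (out : List String) : Decidable (Spec_subseq1 sumString string seq arr k out) := by unfold Spec_subseq1; infer_instance

-- ===== CLAIM (what is proved, stated in full; the proofs are below) =====
def Claim_equal_subseq1 : Prop := ∀ (sumString : Int) (string : String) (seq : String) (arr : List String) (k : Int), Dom_subseq1 sumString string seq arr k → Pre_subseq1 sumString string seq arr k → Spec_subseq1 sumString string seq arr k (subseq1 sumString string seq arr k)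

-- ===== LEMMAS AND PROOFS =====

theorem numsOf_length {cs : List Char} {nums : List Int} (h : numsOf cs = some nums) :
    nums.length = cs.length := by
  induction cs generalizing nums with
  | nil => simp [numsOf] at h; simp [← h]
  | cons c rest ih =>
    simp only [numsOf] at h
    cases hv : PySem.Int.ofStr? (String.mk [c]) with
    | none => simp [hv] at h
    | some v =>
      cases hr : numsOf rest with
      | none => simp [hv, hr] at h
      | some vs => simp [hv, hr] at h; simp [← h, ih hr]

theorem numsOf_append {ys : List Char} {c : Char} {nums : List Int}
    (h : numsOf (ys ++ [c]) = some nums) :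
    ∃ vy v, numsOf ys = some vy ∧ PySem.Int.ofStr? (String.mk [c]) = some v ∧ nums = vy ++ [v] := by
  induction ys generalizing nums with
  | nil =>
    simp only [List.nil_append, numsOf] at h
    cases hv : PySem.Int.ofStr? (String.mk [c]) with
    | none => simp [hv] at h
    | some v => simp [hv] at h; exact ⟨[], v, rfl, rfl, by simp [← h]⟩
  | cons y ys ih =>
    simp only [List.cons_append, numsOf] at h
    cases hy : PySem.Int.ofStr? (String.mk [y]) with
    | none => simp [hy] at h
    | some vy0 =>
      cases hr : numsOf (ys ++ [c]) with
      | none => simp [hy, hr] at h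
      | some vs =>
        simp only [hy, hr] at h
        obtain ⟨vy, v, h1, h2, h3⟩ := ih hr
        exact ⟨vy0 :: vy, v, by simp [numsOf, hy, h1], h2, by injection h with h'; simp [← h', h3]⟩

-- inner fold over the shorter list agrees (all indices touched are < ys.length)
theorem gB_fold_short (ys : List Char) (c : Char) (vy : List Int) (v : Int)
    (hlen : vy.length = ys.length) (mask : Nat) (p : Int × List Char) :
    (List.range ys.length).foldl (gB (ys ++ [c]) (vy ++ [v]) mask) p
      = (List.range ys.length).foldl (gB ys vy mask) p := by
  apply PySem.List.foldl_congr_mem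
  intro acc i hi
  simp only [List.mem_range] at hi
  unfold gB
  rw [List.getD_append _ _ _ _ (by omega), List.getD_append _ _ _ _ (by omega)]

-- splitting the inner fold at the last index
theorem gB_fold_split (ys : List Char) (c : Char) (vy : List Int) (v : Int)
    (hlen : vy.length = ys.length) (mask : Nat) :
    (List.range (ys ++ [c]).length).foldl (gB (ys ++ [c]) (vy ++ [v]) mask) (0, ([] : List Char))
      = (let q := (List.range ys.length).foldl (gB ys vy mask) (0, ([] : List Char));
         if mask.testBit ys.length then (q.1 + v, q.2 ++ [c]) else q) := by
  simp only [List.length_append, List.length_cons, List.length_nil, List.range_succ,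
    List.foldl_append, List.foldl_cons, List.foldl_nil]
  rw [gB_fold_short ys c vy v hlen]
  unfold gB
  have h1 : (vy ++ [v]).getD ys.length 0 = v := by
    rw [← hlen]; simp [List.getD_eq_getElem?_getD]
  have h2 : (ys ++ [c]).getD ys.length ' ' = c := by
    simp [List.getD_eq_getElem?_getD]
  rw [h1, h2]

theorem main_lemma (cs : List Char) (nums : List Int) (h : numsOf cs = some nums)
    (sumString : Int) (string : List Char) (arr : List String) (k : Int) :
    subseq1Aux sumString string cs arr k
      = (List.range (2 ^ cs.length)).foldl (fB cs nums sumString string k) arr := by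
  induction cs using List.reverseRecOn generalizing nums sumString string arr with
  | nil =>
    simp only [numsOf, Option.some.injEq] at h
    simp [subseq1Aux, fB, ← h]
  | append_singleton ys c ih =>
    obtain ⟨vy, v, h1, h2, h3⟩ := numsOf_append h
    have hlen : vy.length = ys.length := numsOf_length h1
    -- left side: one step of A's recursion
    rw [subseq1Aux, dif_neg (show ¬(ys ++ [c] = []) by simp)]
    simp only [PySem.List.pyGet?_neg_one_append_singleton, h2,
      PySem.List.slice_to_neg_one, List.dropLast_concat]
    rw [ih vy h1, ih vy h1]
    -- right side: split the mask range in two halves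
    have hpow : 2 ^ (ys ++ [c]).length = 2 ^ ys.length + 2 ^ ys.length := by
      simp [List.length_append, pow_succ]; ring
    rw [hpow, List.range_add, List.foldl_append, List.foldl_map]
    subst h3
    have hfirst : List.foldl (fB (ys ++ [c]) (vy ++ [v]) sumString string k) arr (List.range (2 ^ ys.length))
        = List.foldl (fB ys vy sumString string k) arr (List.range (2 ^ ys.length)) := by
      apply PySem.List.foldl_congr_mem
      intro acc mask hm
      simp only [List.mem_range] at hm
      unfold fB
      rw [gB_fold_split ys c vy v hlen]
      simp [Nat.testBit_lt_two_pow hm]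
    rw [hfirst]
    apply PySem.List.foldl_congr_mem
    intro acc m hm
    simp only [List.mem_range] at hm
    show fB ys vy (v + sumString) (c :: string) k acc m
        = fB (ys ++ [c]) (vy ++ [v]) sumString string k acc (2 ^ ys.length + m)
    unfold fB
    rw [gB_fold_split ys c vy v hlen]
    have hbit : (2 ^ ys.length + m).testBit ys.length = true := by
      rw [Nat.testBit_two_pow_add_eq, Nat.testBit_lt_two_pow hm]; rfl
    have hinner : (List.range ys.length).foldl (gB ys vy (2 ^ ys.length + m)) (0, ([] : List Char))
        = (List.range ys.length).foldl (gB ys vy m) (0, ([] : List Char)) := by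
      apply PySem.List.foldl_congr_mem
      intro acc' i hi
      simp only [List.mem_range] at hi
      unfold gB
      rw [Nat.testBit_two_pow_add_gt hi]
    simp only [hbit, if_true, hinner]
    have harith : ∀ q1 : Int, q1 + v + sumString = q1 + (v + sumString) := by intro q1; ring
    simp only [harith, List.append_assoc, List.singleton_append]

theorem subseq1_spec : Claim_equal_subseq1 := by
  intro sumString string seq arr k _hdom hpre
  unfold Spec_subseq1 subseq1 subseq1_alt
  unfold Pre_subseq1 at hpre
  have hnums : ∀ l : List Char, l.all (fun c => (PySem.Int.ofStr? (String.mk [c])).isSome) = true →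
      ∃ nums, numsOf l = some nums := by
    intro l
    induction l with
    | nil => exact fun _ => ⟨[], rfl⟩
    | cons c rest ih =>
      intro hl
      simp only [List.all_cons, Bool.and_eq_true] at hl
      obtain ⟨nums, hn⟩ := ih hl.2
      obtain ⟨v, hv⟩ := Option.isSome_iff_exists.mp hl.1
      exact ⟨v :: nums, by simp [numsOf, hv, hn]⟩
  obtain ⟨nums, hn⟩ := hnums seq.toList hpre
  rw [hn]
  exact main_lemma seq.toList nums hn sumString string.toList arr k
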